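-- pv_equiv track=rewrite | github.com/tylerBrittain42/Advent-of-Code-2021 | day_7/part_2.py | generate_ref_map
-- ===== SOURCE A (Python) =====
-- def generate_ref_map(upper_bound):
--     last = 0
--     step = 0
--     ref_map = {}
--
--     for i in range(0,upper_bound+1):
--         ref_map[i] = last + step
--         last = ref_map[i]
--         step += 1
--     return ref_map
-- ===== SOURCE B (Python) =====
-- def generate_ref_map(upper_bound):
--     return {i: i * (i + 1) // 2 for i in range(upper_bound + 1)}
-- ===== Notes on version B (the rewrite author's own statement) =====
-- stated objective: simpler
-- what changed: Replaced the stateful loop threading a running sum (last) and increment (step) across iterations with a one-line comprehension computing each triangular number directly from its index by the closed form i*(i+1)//2.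
import Mathlib
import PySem

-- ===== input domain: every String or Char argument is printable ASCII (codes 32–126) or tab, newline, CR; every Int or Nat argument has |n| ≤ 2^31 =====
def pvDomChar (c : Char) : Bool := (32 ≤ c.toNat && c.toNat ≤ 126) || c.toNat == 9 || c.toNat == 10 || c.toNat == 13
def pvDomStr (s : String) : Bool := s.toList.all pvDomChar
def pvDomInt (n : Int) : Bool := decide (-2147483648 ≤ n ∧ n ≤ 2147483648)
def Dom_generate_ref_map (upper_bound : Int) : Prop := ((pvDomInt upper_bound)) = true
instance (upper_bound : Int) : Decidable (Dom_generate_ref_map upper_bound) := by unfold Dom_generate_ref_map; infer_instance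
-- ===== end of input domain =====

-- B replaces A's cross-iteration running-sum state (last/step) with the closed form i*(i+1)//2 per key: simpler, same O(n).


-- ===== PORT A =====
-- one loop iteration: ref_map[i] = last + step; last = ref_map[i]; step += 1
def pvStepA (s : Int × Int × PySem.Dict Int Int) (i : Int) : Int × Int × PySem.Dict Int Int :=
  let v := s.1 + s.2.1
  (v, s.2.1 + 1, s.2.2.insert i v)

def generate_ref_map (upper_bound : Int) : List (Int × Int) :=
  ((PySem.List.pyRange 0 (upper_bound + 1) 1).foldl pvStepA (0, 0, PySem.Dict.empty)).2.2.items

-- ===== PORT B =====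
def pvTri (i : Int) : Int := PySem.Int.floordiv (i * (i + 1)) 2

def generate_ref_map_alt (upper_bound : Int) : List (Int × Int) :=
  (PySem.List.pyRange 0 (upper_bound + 1) 1).map (fun i => (i, pvTri i))

-- ===== PRECONDITION & SPEC =====
def Spec_generate_ref_map (upper_bound : Int) (out : List (Int × Int)) : Prop := out = generate_ref_map_alt upper_bound
instance (upper_bound : Int) (out : List (Int × Int)) : Decidable (Spec_generate_ref_map upper_bound out) := by unfold Spec_generate_ref_map; infer_instance

-- ===== CLAIM (what is proved, stated in full; the proofs are below) =====
def Claim_equal_generate_ref_map : Prop := ∀ (upper_bound : Int), Dom_generate_ref_map upper_bound → Spec_generate_ref_map upper_bound (generate_ref_map upper_bound)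

-- ===== LEMMAS AND PROOFS =====

theorem pvTri_succ (m : Int) : pvTri m + (m + 1) = pvTri (m + 1) := by
  unfold pvTri
  rw [PySem.Int.floordiv_eq_ediv_of_pos (by norm_num), PySem.Int.floordiv_eq_ediv_of_pos (by norm_num)]
  have hexp : (m + 1) * (m + 1 + 1) = m * (m + 1) + 2 * (m + 1) := by ring
  omega

theorem pvA_loop (n : Nat) :
    (PySem.List.pyRange 0 (n : Int) 1).foldl pvStepA (0, 0, PySem.Dict.empty)
      = (pvTri ((n : Int) - 1), (n : Int),
         PySem.Dict.mk ((PySem.List.pyRange 0 (n : Int) 1).map (fun i => (i, pvTri i)))) := by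
  induction n with
  | zero =>
    simp [PySem.List.pyRange_one_eq_nil (by norm_num : (0:Int) ≤ 0)]
    decide
  | succ k ih =>
    have hk : (0:Int) ≤ (k : Int) := by positivity
    have hr : PySem.List.pyRange 0 ((k : Int) + 1) 1
        = PySem.List.pyRange 0 (k : Int) 1 ++ [(k : Int)] :=
      PySem.List.pyRange_one_succ_right hk
    push_cast
    rw [hr, List.foldl_append, ih]
    simp only [List.foldl_cons, List.foldl_nil]
    have hcon : (PySem.Dict.mk ((PySem.List.pyRange 0 (k : Int) 1).map
        (fun i => (i, pvTri i)))).contains (k : Int) = false := by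
      rw [Bool.eq_false_iff]
      intro h
      have hmem := (PySem.Dict.contains_iff_mem_keys _ _).mp h
      rw [PySem.Dict.keys_mk, List.map_map] at hmem
      obtain ⟨x, hx, hxe⟩ := List.mem_map.mp hmem
      have := (PySem.List.mem_pyRange_one.mp hx).2
      simp [Function.comp] at hxe
      omega
    unfold pvStepA
    simp only
    have hval : pvTri ((k : Int) - 1) + (k : Int) = pvTri (k : Int) := by
      have := pvTri_succ ((k : Int) - 1)
      simpa using this
    refine Prod.ext ?_ (Prod.ext ?_ ?_)
    · simpa using hval
    · simp
    · simp only
      apply PySem.Dict.ext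
      rw [PySem.Dict.items_insert_of_not_contains _ _ hcon]
      simp [hval]

-- ===== VERDICT (by name: the statement is the Claim_ definition above) =====
theorem generate_ref_map_spec : Claim_equal_generate_ref_map := by
  intro ub _
  unfold Spec_generate_ref_map generate_ref_map generate_ref_map_alt
  by_cases h : ub + 1 ≤ 0
  · rw [PySem.List.pyRange_one_eq_nil (by omega)]
    decide
  · have hn : ub + 1 = ((ub + 1).toNat : Int) := by omega
    rw [hn, pvA_loop]
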